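-- pv_equiv track=rewrite | github.com/mikf/gallery-dl | gallery_dl/aes.py | shift_block
-- ===== SOURCE A (Python) =====
-- def shift_block(data):
--     data_shifted = []
--
--     bit = 0
--     for n in data:
--         if bit:
--             n |= 0x100
--         bit = n & 1
--         n >>= 1
--         data_shifted.append(n)
--
--     return data_shifted
-- ===== SOURCE B (Python) =====
-- def shift_block(data):
--     # Divide and conquer: shift each half independently, then fix up the one
--     # carry bit that crosses the split (the low bit of the last left element
--     # becomes the high bit 0x80 of the first right element).  Correct because
--     # (n | 0x100) >> 1 == (n >> 1) | 0x80, so the carry can be OR-ed in after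
--     # the shift, and no other carry crosses the boundary.
--     if len(data) <= 1:
--         return [n >> 1 for n in data]
--     mid = len(data) // 2
--     left = shift_block(data[:mid])
--     right = shift_block(data[mid:])
--     if data[mid - 1] & 1:
--         right[0] |= 0x80
--     return left + right
-- ===== Notes on version B (the rewrite author's own statement) =====
-- stated objective: alternative
-- what changed: Replaced the sequential carry-threading loop by a divide-and-conquer: each half is shifted independently and the single carry bit crossing the split is OR-ed into the first element of the right half afterwards.
import Mathlib
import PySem

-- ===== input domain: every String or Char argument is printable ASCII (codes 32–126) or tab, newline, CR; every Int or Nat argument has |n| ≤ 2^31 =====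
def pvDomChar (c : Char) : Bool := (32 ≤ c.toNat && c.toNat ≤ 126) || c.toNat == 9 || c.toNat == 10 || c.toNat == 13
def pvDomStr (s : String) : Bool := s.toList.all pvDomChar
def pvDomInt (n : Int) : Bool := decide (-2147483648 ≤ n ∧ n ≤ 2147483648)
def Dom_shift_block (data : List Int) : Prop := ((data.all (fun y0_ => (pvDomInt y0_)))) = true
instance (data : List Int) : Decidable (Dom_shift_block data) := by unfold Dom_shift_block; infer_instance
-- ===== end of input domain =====

-- B replaces A's sequential carry-threading loop by a divide-and-conquer (shift halves, OR the one crossing carry bit in afterwards); alternative decomposition, same result.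


-- ===== PORT A =====
-- literal port of A: one pass keeping the carry bit and the output list as the fold state
def shift_block (data : List Int) : List Int :=
  (data.foldl (fun (st : Int × List Int) n =>
      let n1 := if st.1 ≠ 0 then PySem.Int.bor n 256 else n    -- if bit: n |= 0x100
      let bit := PySem.Int.band n1 1                           -- bit = n & 1
      (bit, st.2 ++ [n1 >>> (1:Int)]))                         -- n >>= 1; append
    ((0:Int), ([] : List Int))).2

-- ===== PORT B =====
-- literal port of B: divide and conquer; data[mid-1] is ported as getD (index provably in range,
-- mid-1 < data.length, so it equals Python's data[mid-1]); right[0] |= 0x80 is the head patch.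
def shift_block_alt (data : List Int) : List Int :=
  if _h : data.length ≤ 1 then data.map (fun n => n >>> (1:Int))
  else
    let mid : Nat := data.length / 2
    let left := shift_block_alt (data.take mid)
    let right := shift_block_alt (data.drop mid)
    let right' :=
      if PySem.Int.band (data.getD (mid - 1) 0) 1 ≠ 0 then
        match right with
        | [] => []
        | r :: rs => PySem.Int.bor r 128 :: rs
      else right
    left ++ right'
  termination_by data.length
  decreasing_by
    · simpa using by omega
    · simpa using by omega

-- ===== PRECONDITION & SPEC =====
def Spec_shift_block (data : List Int) (out : List Int) : Prop := out = shift_block_alt data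
instance (data : List Int) (out : List Int) : Decidable (Spec_shift_block data out) := by unfold Spec_shift_block; infer_instance

-- ===== CLAIM (what is proved, stated in full; the proofs are below) =====
def Claim_equal_shift_block : Prop := ∀ (data : List Int), Dom_shift_block data → Spec_shift_block data (shift_block data)

-- ===== LEMMAS AND PROOFS =====

-- reference function: the mathematical description both ports are reduced to
def refShift : List Int → Int → List Int
  | [], _ => []
  | n :: rest, c =>
      (if c = 1 then PySem.Int.bor (n >>> (1:Int)) 128 else n >>> (1:Int)) ::
        refShift rest (PySem.Int.band n 1)

def carryAfter : List Int → Int → Int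
  | [], c => c
  | n :: rest, _ => carryAfter rest (PySem.Int.band n 1)

theorem ldiff_add_and (n m : Nat) : n.ldiff m + (n &&& m) = n := by
  induction n using Nat.binaryRec generalizing m with
  | zero => simp [Nat.ldiff]
  | bit b n ih =>
    obtain ⟨c, m', rfl⟩ : ∃ c m', m = Nat.bit c m' :=
      ⟨m.testBit 0, m >>> 1, (Nat.bit_testBit_zero_shiftRight_one m).symm⟩
    rw [Nat.ldiff_bit, Nat.land_bit, Nat.bit_val, Nat.bit_val, Nat.bit_val]
    have := ih m'; rcases b <;> rcases c <;> simp <;> omega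

theorem pb_bor (a b : Int) : PySem.Int.bor a b = Int.lor a b := by
  unfold PySem.Int.bor
  rcases a with m | m <;> rcases b with n | n <;> simp [Int.lor, Int.negSucc_eq] <;>
    (try have h1 := ldiff_add_and n m) <;> (try have h2 := ldiff_add_and m n) <;> omega

theorem pb_band (a b : Int) : PySem.Int.band a b = Int.land a b := by
  unfold PySem.Int.band
  rcases a with m | m <;> rcases b with n | n <;> simp [Int.land, Int.negSucc_eq] <;>
    (try have h1 := ldiff_add_and m n) <;> (try have h2 := ldiff_add_and n m) <;> omega

theorem land_zero (m : Int) : Int.land m 0 = 0 := by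
  rcases m <;> simp [Int.land, Nat.ldiff]

theorem shiftRight_one_eq_div2 (n : Int) : n >>> (1:Int) = Int.div2 n := by
  rw [show ((1:Int)) = ((1:Nat):Int) from rfl]
  rcases n with m | m
  · rw [show ((Int.ofNat m) = ((m:Nat) : Int)) from rfl, Int.shiftRight_natCast]
    simp [Int.div2, Nat.div2_val, Nat.shiftRight_succ]
  · rw [Int.shiftRight_negSucc]
    simp [Int.div2, Nat.div2_val, Nat.shiftRight_succ]

theorem div2_bit (b : Bool) (m : Int) : Int.div2 (Int.bit b m) = m := by
  rcases b <;> · simp [Int.bit_val, Int.div2_val]; try omega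

theorem key_shift (n : Int) : Int.lor n 256 >>> (1:Int) = Int.lor (n >>> (1:Int)) 128 := by
  have h := Int.bit_decomp n
  rw [← h, show (256:Int) = Int.bit false 128 from rfl, Int.lor_bit,
     shiftRight_one_eq_div2, shiftRight_one_eq_div2, div2_bit, div2_bit]

theorem key_band (n : Int) : Int.land (Int.lor n 256) 1 = Int.land n 1 := by
  have h := Int.bit_decomp n
  rw [← h, show (256:Int) = Int.bit false 128 from rfl, Int.lor_bit,
     show (1:Int) = Int.bit true 0 from rfl, Int.land_bit, Int.land_bit]
  simp [land_zero]

theorem band_one_cases (n : Int) : PySem.Int.band n 1 = 0 ∨ PySem.Int.band n 1 = 1 := by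
  rw [pb_band]
  have h := Int.bit_decomp n
  rw [← h, show (1:Int) = Int.bit true 0 from rfl, Int.land_bit]
  rcases Int.bodd n <;> simp [Int.bit_val, land_zero]

-- A's fold from an admissible carry equals refShift with that carry
theorem loop_eq (data : List Int) : ∀ (c : Int) (acc : List Int), (c = 0 ∨ c = 1) →
    (data.foldl (fun (st : Int × List Int) n =>
        let n1 := if st.1 ≠ 0 then PySem.Int.bor n 256 else n
        let bit := PySem.Int.band n1 1
        (bit, st.2 ++ [n1 >>> (1:Int)])) (c, acc)).2
    = acc ++ refShift data c := by
  induction data with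
  | nil => intro c acc _; simp [refShift]
  | cons n rest ih =>
    intro c acc hc
    have hb := band_one_cases n
    simp only [List.foldl, refShift]
    rcases hc with rfl | rfl
    · have hif : ¬ ((0:Int) ≠ 0) := by simp
      simp only [hif, if_false]
      rw [ih (PySem.Int.band n 1) _ hb]
      simp
    · have hif : ((1:Int) ≠ 0) := by decide
      rw [if_pos hif]
      have h2 : PySem.Int.band (PySem.Int.bor n 256) 1 = PySem.Int.band n 1 := by
        rw [pb_band, pb_bor, pb_band]; exact key_band n
      have h1 : PySem.Int.bor n 256 >>> (1:Int)
          = PySem.Int.bor (n >>> (1:Int)) 128 := by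
        rw [pb_bor, pb_bor]; exact key_shift n
      rw [h2, ih (PySem.Int.band n 1) _ hb, h1]
      simp

theorem refShift_append (xs ys : List Int) : ∀ c,
    refShift (xs ++ ys) c = refShift xs c ++ refShift ys (carryAfter xs c) := by
  induction xs with
  | nil => intro c; simp [refShift, carryAfter]
  | cons n rest ih => intro c; simp [refShift, carryAfter, ih]

theorem carryAfter_eq_last (xs : List Int) : ∀ c, xs ≠ [] →
    carryAfter xs c = PySem.Int.band (xs.getD (xs.length - 1) 0) 1 := by
  induction xs with
  | nil => intro c h; exact absurd rfl h
  | cons n rest ih =>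
    intro c _
    cases rest with
    | nil => simp [carryAfter]
    | cons m t =>
      have := ih (PySem.Int.band n 1) (by simp)
      simp only [carryAfter] at this ⊢
      rw [this]
      have hlen : (m :: t).length - 1 + 1 = (n :: m :: t).length - 1 := by simp
      rw [← hlen, List.getD_cons_succ]

-- B equals refShift with carry 0
theorem alt_eq_ref : ∀ (fuel : Nat) (data : List Int), data.length ≤ fuel →
    shift_block_alt data = refShift data 0 := by
  intro fuel
  induction fuel with
  | zero =>
    intro data h
    have : data = [] := by cases data <;> simp_all
    subst this; rw [shift_block_alt]; simp [refShift]
  | succ k ih =>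
    intro data hlen
    rw [shift_block_alt]
    by_cases h : data.length ≤ 1
    · rw [dif_pos h]
      rcases data with _ | ⟨n, _ | ⟨m, t⟩⟩
      · simp [refShift]
      · simp [refShift]
      · simp at h
    · rw [dif_neg h]
      have hlen2 : 2 ≤ data.length := by omega
      set mid : Nat := data.length / 2 with hmid
      have hmid1 : 1 ≤ mid := by omega
      have hmidlt : mid < data.length := by omega
      have hL : (data.take mid).length = mid := by simp; omega
      have hR : (data.drop mid).length = data.length - mid := by simp
      simp only []
      rw [ih (data.take mid) (by omega), ih (data.drop mid) (by omega)]
      have hsplit : data = data.take mid ++ data.drop mid := (List.take_append_drop mid data).symm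
      conv_rhs => rw [hsplit]
      rw [refShift_append]
      congr 1
      have hLne : data.take mid ≠ [] := by
        intro hnil; have := congrArg List.length hnil; simp [hL] at this; omega
      rw [carryAfter_eq_last _ _ hLne, hL]
      have hget : (data.take mid).getD (mid - 1) 0 = data.getD (mid - 1) 0 := by
        have h1 : mid - 1 < data.length := by omega
        have h2 : mid - 1 < mid := by omega
        simp [List.getD, h2]
      rw [hget]
      rcases band_one_cases (data.getD (mid - 1) 0) with hb | hb
      · rw [hb]; simp
      · rw [hb]
        have hif : ((1:Int) ≠ 0) := by decide
        rw [if_pos hif]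
        have hRne : data.drop mid ≠ [] := by
          intro hnil; have := congrArg List.length hnil; simp at this; omega
        rcases hdrop : data.drop mid with _ | ⟨r, rs⟩
        · exact absurd hdrop hRne
        · simp [refShift]

-- ===== VERDICT (by name: the statement is the Claim_ definition above) =====
theorem shift_block_spec : Claim_equal_shift_block := by
  intro data _
  unfold Spec_shift_block shift_block
  rw [loop_eq data 0 [] (Or.inl rfl), alt_eq_ref data.length data le_rfl]
  simp
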